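-- pv_equiv track=rewrite | github.com/mfiaschi5/microstati | microstati.py | generate_orbital_strings
-- ===== SOURCE A (Python) =====
-- from itertools import combinations
--
-- def generate_orbital_strings(n_electrons, n_orbitals=2):
--     """
--     Genera tutte le possibili stringhe di occupazione per una data configurazione
--
--     """
--
--     electron_positions = combinations(range(n_orbitals * 2), n_electrons)
--
--
--     orbital_strings = []
--     for positions in electron_positions:
--         string = ['0'] * n_orbitals * 2
--         for pos in positions:
--             string[pos] = '1'
--         orbital_strings.append(''.join(string))
--
--     return orbital_strings
-- ===== SOURCE B (Python) =====
-- def generate_orbital_strings(n_electrons, n_orbitals=2):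
--     """Branch-and-prune DFS over bit positions with an explicit stack (no itertools)."""
--     length = n_orbitals * 2
--     result = []
--     stack = [(0, n_electrons, '')]
--     while stack:
--         pos, remaining, current = stack.pop()
--         if pos >= length:
--             if remaining == 0:
--                 result.append(current)
--             continue
--         # pushed '0' branch first so the '1' branch is explored first (lexicographic order)
--         if length - pos - 1 >= remaining:
--             stack.append((pos + 1, remaining, current + '0'))
--         if remaining > 0:
--             stack.append((pos + 1, remaining - 1, current + '1'))
--     return result
-- ===== Notes on version B (the rewrite author's own statement) =====
-- stated objective: alternative
-- what changed: Replaces itertools.combinations plus a per-combination zero-fill-and-set pass by an explicit-stack branch-and-prune DFS over bit positions ('1' branch explored before the feasible '0' branch), building each string incrementally with no position lists.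
import Mathlib
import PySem

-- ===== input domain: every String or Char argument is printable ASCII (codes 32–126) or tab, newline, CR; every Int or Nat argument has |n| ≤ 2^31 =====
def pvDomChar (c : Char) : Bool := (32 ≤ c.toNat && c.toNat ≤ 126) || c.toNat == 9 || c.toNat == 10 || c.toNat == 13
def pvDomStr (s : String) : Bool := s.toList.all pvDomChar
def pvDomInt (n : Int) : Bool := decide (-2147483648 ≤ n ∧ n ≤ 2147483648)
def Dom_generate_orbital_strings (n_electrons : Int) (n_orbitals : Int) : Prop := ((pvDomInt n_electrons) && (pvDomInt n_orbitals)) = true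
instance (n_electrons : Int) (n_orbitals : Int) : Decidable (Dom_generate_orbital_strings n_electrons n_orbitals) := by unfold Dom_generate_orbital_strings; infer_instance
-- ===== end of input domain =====

-- B replaces itertools.combinations + per-combination fill-and-set by a recursive
-- branch-and-prune over bit positions (objective: alternative, same cost).

-- ===== PORT A =====
-- itertools.combinations is ported by the PySem primitive of the same semantics;
-- `pos.toNat` is exact because every position comes from range(0, n_orbitals*2).
def generate_orbital_strings (n_electrons : Int) (n_orbitals : Int) : List String :=
  let pool := PySem.List.pyRange 0 (n_orbitals * 2) 1
  -- CPython's combinations(pool, r) short-circuits with 'if r > n: return' before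
  -- iterating; the guard transcribes that (it equals the unguarded value, see hsel below)
  let electron_positions :=
    if pool.length < n_electrons.toNat then []
    else PySem.List.combinations pool n_electrons.toNat
  electron_positions.foldl
    (fun orbital_strings positions =>
      let string := List.replicate n_orbitals.toNat '0' ++ List.replicate n_orbitals.toNat '0'
      let string := positions.foldl (fun s pos => s.set pos.toNat '1') string
      orbital_strings ++ [String.mk string])
    []

-- ===== PORT B =====
-- Source B's explicit stack pushes/pops at the RIGHT end of a Python list; the port keeps
-- the stack top at the HEAD of the Lean list (same contents, same pop order):
-- pushing '0' then '1' puts the '1' frame on top, exactly as in Source B.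
-- fuel only makes the loop structurally total: 3^L bounds the number of pops
-- (gosRun_eq below shows it is never exhausted), so each step is Source B's step.
def gosRun (length : Int) (fuel : Nat) (stack : List (Int × Int × List Char)) (result : List String) : List String :=
  match fuel, stack with
  | _, [] => result
  | 0, _ => result
  | f + 1, (pos, remaining, current) :: rest =>
    if pos ≥ length then
      gosRun length f rest (if remaining = 0 then result ++ [String.mk current] else result)
    else
      gosRun length f
        ((if remaining > 0 then [(pos + 1, remaining - 1, current ++ ['1'])] else []) ++
         (if length - pos - 1 ≥ remaining then [(pos + 1, remaining, current ++ ['0'])] else []) ++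
         rest)
        result

def generate_orbital_strings_alt (n_electrons : Int) (n_orbitals : Int) : List String :=
  gosRun (n_orbitals * 2) (3 ^ (n_orbitals * 2).toNat) [(0, n_electrons, [])] []

-- ===== PRECONDITION & SPEC =====
-- A raises ValueError (combinations with negative r) iff n_electrons < 0; Pre_ excludes exactly that.
def Pre_generate_orbital_strings (n_electrons : Int) (n_orbitals : Int) : Prop :=
  0 ≤ n_electrons
instance (n_electrons : Int) (n_orbitals : Int) : Decidable (Pre_generate_orbital_strings n_electrons n_orbitals) := by
  unfold Pre_generate_orbital_strings; infer_instance

def pvWitness_generate_orbital_strings : Int × Int := (1, 2)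

def Spec_generate_orbital_strings (n_electrons : Int) (n_orbitals : Int) (out : List String) : Prop := out = generate_orbital_strings_alt n_electrons n_orbitals
instance (n_electrons : Int) (n_orbitals : Int) (out : List String) : Decidable (Spec_generate_orbital_strings n_electrons n_orbitals out) := by unfold Spec_generate_orbital_strings; infer_instance

-- ===== CLAIM (what is proved, stated in full; the proofs are below) =====
def Claim_equal_generate_orbital_strings : Prop := ∀ (n_electrons : Int) (n_orbitals : Int), Dom_generate_orbital_strings n_electrons n_orbitals → Pre_generate_orbital_strings n_electrons n_orbitals → Spec_generate_orbital_strings n_electrons n_orbitals (generate_orbital_strings n_electrons n_orbitals)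


-- ===== LEMMAS AND PROOFS =====

-- recursive rendering of the DFS: what one stack frame contributes, in order
def gosBuild (slots : Nat) (remaining : Int) (current : List Char) : List String :=
  match slots with
  | 0 => if remaining = 0 then [String.mk current] else []
  | s + 1 =>
    (if remaining > 0 then gosBuild s (remaining - 1) (current ++ ['1']) else []) ++
    (if (s : Int) ≥ remaining then gosBuild s remaining (current ++ ['0']) else [])

-- the stack machine of port B never exhausts its fuel and flushes each frame
-- to its gosBuild expansion, in order
lemma gosRun_eq (length : Int) : ∀ (fuel : Nat) (stack : List (Int × Int × List Char)) (result : List String),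
    (stack.map (fun t => 3 ^ ((length - t.1).toNat))).sum ≤ fuel →
    gosRun length fuel stack result =
      result ++ stack.flatMap (fun t => gosBuild ((length - t.1).toNat) t.2.1 t.2.2) := by
  intro fuel
  induction fuel with
  | zero =>
    intro stack result h
    cases stack with
    | nil => simp [gosRun]
    | cons t rest =>
      exfalso
      have h1 : 1 ≤ 3 ^ ((length - t.1).toNat) := Nat.one_le_pow _ _ (by omega)
      simp only [List.map_cons, List.sum_cons] at h
      omega
  | succ f ih =>
    intro stack result h
    cases stack with
    | nil => simp [gosRun]
    | cons t rest =>
      obtain ⟨pos, remaining, current⟩ := t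
      simp only [List.map_cons, List.sum_cons] at h
      by_cases hpos : pos ≥ length
      · have h1 : 1 ≤ 3 ^ ((length - pos).toNat) := Nat.one_le_pow _ _ (by omega)
        rw [show gosRun length (f+1) ((pos, remaining, current) :: rest) result
            = gosRun length f rest (if remaining = 0 then result ++ [String.mk current] else result)
          from by simp [gosRun, hpos]]
        rw [ih rest _ (by omega)]
        have h0 : (length - pos).toNat = 0 := by omega
        simp only [List.flatMap_cons, h0, gosBuild]
        split_ifs <;> simp
      · have hs : (length - pos).toNat = (length - (pos + 1)).toNat + 1 := by omega
        have h3 : (3:Nat) ^ ((length - pos).toNat) = 3 * 3 ^ ((length - (pos+1)).toNat) := by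
          rw [hs, pow_succ]; ring
        have h1 : 1 ≤ (3:Nat) ^ ((length - (pos+1)).toNat) := Nat.one_le_pow _ _ (by omega)
        rw [show gosRun length (f+1) ((pos, remaining, current) :: rest) result
            = gosRun length f
                ((if remaining > 0 then [(pos + 1, remaining - 1, current ++ ['1'])] else []) ++
                 (if length - pos - 1 ≥ remaining then [(pos + 1, remaining, current ++ ['0'])] else []) ++
                 rest) result
          from by simp [gosRun, hpos]]
        rw [ih _ _ (by split_ifs <;> simp only [List.map_append, List.sum_append,
              List.map_cons, List.sum_cons, List.map_nil, List.sum_nil] <;> omega)]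
        have hcast : ((length - (pos + 1)).toNat : Int) = length - pos - 1 := by omega
        simp only [List.flatMap_cons, List.flatMap_append, hs, gosBuild, hcast]
        split_ifs <;> simp

-- the '1'/'0' pattern a positions-list denotes on the index window [a, b)
def gosMask (a b : Int) (ps : List Int) : List Char :=
  (PySem.List.pyRange a b 1).map (fun i => if i ∈ ps then '1' else '0')

lemma gosMask_nil_range (a b : Int) (h : b ≤ a) (ps : List Int) : gosMask a b ps = [] := by
  simp [gosMask, PySem.List.pyRange_one_eq_nil h]

lemma gosMask_cons_lt (a b x : Int) (ps : List Int) (hx : x < a) :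
    gosMask a b (x :: ps) = gosMask a b ps := by
  unfold gosMask
  apply List.map_congr_left
  intro i hi
  have := (PySem.List.mem_pyRange_one.mp hi).1
  have hne : i ≠ x := by omega
  simp [List.mem_cons, hne]

lemma gosMask_range_cons (a b : Int) (h : a < b) (ps : List Int) :
    gosMask a b ps = (if a ∈ ps then '1' else '0') :: gosMask (a + 1) b ps := by
  unfold gosMask
  rw [PySem.List.pyRange_one_cons h]
  simp

-- main invariant: gosBuild on `s` slots enumerates exactly the combinations of the
-- index window [a, a+s), in the same order, each rendered behind `cur`.
lemma gosBuild_eq (s : Nat) : ∀ (k : Nat) (a : Int) (cur : List Char),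
    gosBuild s (k : Int) cur =
      (PySem.List.combinations (PySem.List.pyRange a (a + s) 1) k).map
        (fun ps => String.mk (cur ++ gosMask a (a + s) ps)) := by
  induction s with
  | zero =>
    intro k a cur
    have hr : PySem.List.pyRange a (a + (0:Nat)) 1 = [] :=
      PySem.List.pyRange_one_eq_nil (by omega)
    cases k with
    | zero => simp [gosBuild, hr, PySem.List.combinations_zero, gosMask]
    | succ k =>
      simp only [gosBuild, hr, PySem.List.combinations_nil_succ, List.map_nil]
      rw [if_neg (by push_cast; omega)]
  | succ s ih =>
    intro k a cur
    have hlt : a < a + ((s + 1 : Nat) : Int) := by push_cast; omega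
    have hcons : PySem.List.pyRange a (a + ((s+1:Nat) : Int)) 1
        = a :: PySem.List.pyRange (a+1) ((a+1) + (s:Int)) 1 := by
      rw [PySem.List.pyRange_one_cons hlt]
      congr 1
      push_cast; ring_nf
    have hrest_len : (PySem.List.pyRange (a+1) ((a+1) + (s:Int)) 1).length = s := by
      rw [PySem.List.length_pyRange_one]; omega
    have hrest_mem : ∀ x ∈ PySem.List.pyRange (a+1) ((a+1) + (s:Int)) 1, a + 1 ≤ x := by
      intro x hx; exact (PySem.List.mem_pyRange_one.mp hx).1
    have hb : a + ((s+1:Nat) : Int) = (a+1) + (s:Int) := by push_cast; ring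
    cases k with
    | zero =>
      have h0 : gosBuild (s+1) ((0:Nat) : Int) cur = gosBuild s ((0:Nat):Int) (cur ++ ['0']) := by
        simp [gosBuild]
      rw [h0, ih 0 (a+1) (cur ++ ['0'])]
      rw [hcons, PySem.List.combinations_zero, PySem.List.combinations_zero]
      simp only [List.map_cons, List.map_nil]
      rw [gosMask_range_cons a _ hlt, hb]
      simp [gosMask_nil_range]
    | succ k =>
      have hpos : ((k+1:Nat) : Int) > 0 := by push_cast; omega
      have hm1 : ((k+1:Nat) : Int) - 1 = (k : Int) := by push_cast; ring
      have hsplit : gosBuild (s+1) ((k+1:Nat) : Int) cur =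
          gosBuild s (k : Int) (cur ++ ['1']) ++
          (if (s : Int) ≥ ((k+1:Nat) : Int) then gosBuild s ((k+1:Nat):Int) (cur ++ ['0']) else []) := by
        simp only [gosBuild, if_pos hpos, hm1]
      rw [hsplit, hcons, PySem.List.combinations_cons_succ, List.map_append, List.map_map]
      congr 1
      · -- '1' branch ↔ combinations containing a
        rw [ih k (a+1) (cur ++ ['1'])]
        apply List.map_congr_left
        intro ps _
        simp only [Function.comp]
        rw [gosMask_range_cons a _ hlt, hb, gosMask_cons_lt (a+1) _ a ps (by omega)]
        simp
      · -- '0' branch ↔ combinations avoiding a (pruned exactly when too few slots remain)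
        by_cases hks : (k + 1 : Nat) ≤ s
        · rw [if_pos (by push_cast; omega), ih (k+1) (a+1) (cur ++ ['0'])]
          apply List.map_congr_left
          intro ps hps
          have hsub := PySem.List.sublist_of_mem_combinations hps
          have hnot : a ∉ ps := by
            intro ha
            have := hrest_mem a (hsub.mem ha)
            omega
          rw [gosMask_range_cons a _ hlt, hb]
          simp [hnot]
        · rw [if_neg (by push_cast; omega)]
          have hnil : PySem.List.combinations (PySem.List.pyRange (a+1) ((a+1) + (s:Int)) 1) (k+1) = [] := by
            apply PySem.List.combinations_eq_nil_of_length_lt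
            rw [hrest_len]; omega
          rw [hnil]
          simp

-- accumulating `acc ++ [f x]` is mapping
lemma foldl_push {α β : Type} (f : α → β) (l : List α) (init : List β) :
    l.foldl (fun acc x => acc ++ [f x]) init = init ++ l.map f := by
  induction l generalizing init with
  | nil => simp
  | cons x t ih => simp [List.foldl_cons, ih, List.append_assoc]

-- what the fill-and-set loop of A leaves at each index
lemma foldl_set_getElem? (ps : List Int) : ∀ (l : List Char),
    (∀ p ∈ ps, 0 ≤ p ∧ p < (l.length : Int)) → ∀ i : Nat,
    (ps.foldl (fun s pos => s.set pos.toNat '1') l)[i]? =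
      if ((i : Int) ∈ ps) then some '1' else l[i]? := by
  induction ps with
  | nil => intro l _ i; simp
  | cons p t ih =>
    intro l hb i
    have hp := hb p (by simp)
    have hlen : (l.set p.toNat '1').length = l.length := by simp
    have hb' : ∀ q ∈ t, 0 ≤ q ∧ q < ((l.set p.toNat '1').length : Int) := by
      intro q hq; rw [hlen]; exact hb q (by simp [hq])
    rw [List.foldl_cons, ih (l.set p.toNat '1') hb' i]
    by_cases hmem : (i : Int) ∈ t
    · simp [hmem, List.mem_cons]
    · by_cases hip : (i : Int) = p
      · have : p.toNat = i := by omega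
        simp [hmem, hip, List.getElem?_set, this, show i < l.length by omega]
      · have : p.toNat ≠ i := by omega
        simp [hmem, hip, List.getElem?_set, this]

-- A's per-combination string is the mask of its positions
lemma setfold_eq_mask (m : Int) (ps : List Int) (hps : ∀ p ∈ ps, 0 ≤ p ∧ p < m) :
    ps.foldl (fun s pos => s.set pos.toNat '1') (List.replicate m.toNat '0') = gosMask 0 m ps := by
  apply List.ext_getElem?
  intro i
  have hb : ∀ p ∈ ps, 0 ≤ p ∧ p < ((List.replicate m.toNat '0').length : Int) := by
    intro p hp
    have := hps p hp
    simp only [List.length_replicate]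
    omega
  rw [foldl_set_getElem? ps _ hb i]
  unfold gosMask
  rw [List.getElem?_map]
  by_cases hi : i < m.toNat
  · rw [PySem.List.getElem?_pyRange_one]
    have him : ((i : Nat) : Int) < m := by omega
    by_cases hm : (i : Int) ∈ ps
    · simp [him, hm]
    · simp [him, hm, hi]
  · have h1 : (List.replicate m.toNat '0')[i]? = none := by
      rw [List.getElem?_eq_none] <;> simp <;> omega
    have h2 : (PySem.List.pyRange 0 m 1)[i]? = none := by
      rw [List.getElem?_eq_none]
      rw [PySem.List.length_pyRange_one]; omega
    have h3 : (i : Int) ∉ ps := by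
      intro hc
      have := hps _ hc
      omega
    simp [h1, h2, h3]

lemma pyRange_toNat (m : Int) :
    PySem.List.pyRange 0 ((m.toNat : Int)) 1 = PySem.List.pyRange 0 m 1 := by
  by_cases h : 0 ≤ m
  · rw [Int.toNat_of_nonneg h]
  · rw [PySem.List.pyRange_one_eq_nil (by omega), PySem.List.pyRange_one_eq_nil (by omega)]

lemma gosMask_toNat (m : Int) (ps : List Int) :
    gosMask 0 ((m.toNat : Int)) ps = gosMask 0 m ps := by
  unfold gosMask; rw [pyRange_toNat]

-- ===== VERDICT (by name: the statement is the Claim_ definition above) =====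
theorem generate_orbital_strings_spec : Claim_equal_generate_orbital_strings := by
  intro ne no _ hpre
  unfold Spec_generate_orbital_strings generate_orbital_strings generate_orbital_strings_alt
  have hne : ((ne.toNat : Int)) = ne := Int.toNat_of_nonneg hpre
  have hsel : (if (PySem.List.pyRange 0 (no * 2) 1).length < ne.toNat then []
      else PySem.List.combinations (PySem.List.pyRange 0 (no * 2) 1) ne.toNat)
      = PySem.List.combinations (PySem.List.pyRange 0 (no * 2) 1) ne.toNat := by
    split_ifs with h
    · exact (PySem.List.combinations_eq_nil_of_length_lt _ h).symm
    · rfl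
  rw [← hne, gosRun_eq _ _ _ _ (by simp)]
  simp only [List.flatMap_cons, List.flatMap_nil, List.append_nil, List.nil_append, sub_zero]
  rw [gosBuild_eq (no * 2).toNat ne.toNat 0 []]
  simp only [Int.toNat_natCast]
  rw [hsel]
  simp only [zero_add, foldl_push, List.nil_append]
  rw [pyRange_toNat]
  apply List.map_congr_left
  intro ps hps
  have hbound : ∀ p ∈ ps, 0 ≤ p ∧ p < no * 2 := by
    intro p hp
    exact PySem.List.mem_pyRange_one.mp
      ((PySem.List.sublist_of_mem_combinations hps).mem hp)
  have hrep : List.replicate no.toNat '0' ++ List.replicate no.toNat '0'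
      = List.replicate (no * 2).toNat '0' := by
    rw [← List.replicate_add]
    congr 1
    omega
  rw [hrep, setfold_eq_mask (no * 2) ps hbound, gosMask_toNat]
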